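-- pv_equiv track=rewrite | github.com/GeorgMeore/aoc2023 | day2/part1.py | possible_id_sum
-- ===== SOURCE A (Python) =====
-- def possible_id_sum(games):
--     sum = 0
--     for i, game in enumerate(games, 1):
--         maxes = {"red": 0, "green": 0, "blue": 0}
--         for subset in game:
--             for no, color in subset:
--                 maxes[color] = max(maxes[color], no)
--         if maxes["red"] <= 12 and maxes["green"] <= 13 and maxes["blue"] <= 14:
--             sum += i
--     return sum
-- ===== SOURCE B (Python) =====
-- def possible_id_sum(games):
--     limits = {"red": 12, "green": 13, "blue": 14}
--     n = len(games)
--     bad = sum(i for i, game in enumerate(games, 1)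
--               if any(no > limits[color] for subset in game for no, color in subset))
--     return n * (n + 1) // 2 - bad
-- ===== Notes on version B (the rewrite author's own statement) =====
-- stated objective: alternative
-- what changed: B counts by complement: it computes the Gauss closed form n*(n+1)//2 for the sum of all game ids and subtracts the sum of ids of violating games (detected with a short-circuiting any() against a fixed limits dict); no per-game maxes table is built and good games are never accumulated.
import Mathlib
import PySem

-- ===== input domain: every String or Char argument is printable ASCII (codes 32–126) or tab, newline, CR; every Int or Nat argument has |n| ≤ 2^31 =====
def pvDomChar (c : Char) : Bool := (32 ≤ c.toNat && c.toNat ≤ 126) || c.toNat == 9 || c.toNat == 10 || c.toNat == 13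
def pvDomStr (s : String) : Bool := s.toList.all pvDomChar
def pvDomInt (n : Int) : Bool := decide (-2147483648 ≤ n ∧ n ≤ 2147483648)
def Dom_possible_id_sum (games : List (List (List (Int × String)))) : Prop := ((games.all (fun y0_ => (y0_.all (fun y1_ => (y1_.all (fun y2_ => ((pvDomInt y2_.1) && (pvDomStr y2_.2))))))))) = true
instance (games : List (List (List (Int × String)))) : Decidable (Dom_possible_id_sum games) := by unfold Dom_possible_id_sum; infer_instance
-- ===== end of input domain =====

-- B counts by complement: Gauss closed form n*(n+1)//2 for the sum of all ids, minus the
-- sum of ids of violating games, instead of A's per-game maxes table and running sum of good ids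
-- (objective: alternative).

-- ===== PORT A =====
-- maxes[color] (a raising lookup) is ported as getD _ 0: exact under Pre_, which excludes the KeyError inputs.
def pvInitMaxes : PySem.Dict String Int :=
  PySem.Dict.ofList [("red", 0), ("green", 0), ("blue", 0)]

def possible_id_sum (games : List (List (List (Int × String)))) : Int :=
  (games.foldl (fun (st : Int × Int) game =>
      let i := st.2 + 1
      let maxes := game.foldl (fun m subset =>
          subset.foldl (fun m p => m.insert p.2 (max (m.getD p.2 0) p.1)) m) pvInitMaxes
      (if maxes.getD "red" 0 ≤ 12 && maxes.getD "green" 0 ≤ 13 && maxes.getD "blue" 0 ≤ 14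
       then st.1 + i else st.1, i))
    (0, 0)).1

-- ===== PORT B =====
-- limits[color] (a raising lookup) is ported as getD _ 0: exact under Pre_, which excludes the KeyError inputs.
def pvLimits : PySem.Dict String Int :=
  PySem.Dict.ofList [("red", 12), ("green", 13), ("blue", 14)]

def possible_id_sum_alt (games : List (List (List (Int × String)))) : Int :=
  let n : Int := games.length
  let bad := (PySem.List.enumerate games 1).foldl
      (fun acc p =>
        if p.2.any (fun subset => subset.any (fun q => decide (pvLimits.getD q.2 0 < q.1)))
        then acc + p.1 else acc) 0
  PySem.Int.floordiv (n * (n + 1)) 2 - bad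

-- ===== PRECONDITION & SPEC =====
-- Pre_ excludes exactly the inputs containing a color other than "red"/"green"/"blue", on which A raises KeyError.
def Pre_possible_id_sum (games : List (List (List (Int × String)))) : Prop :=
  (games.all (fun game => game.all (fun subset => subset.all (fun p =>
      p.2 == "red" || p.2 == "green" || p.2 == "blue")))) = true
instance (games : List (List (List (Int × String)))) : Decidable (Pre_possible_id_sum games) := by
  unfold Pre_possible_id_sum; infer_instance

def pvWitness_possible_id_sum : (List (List (List (Int × String)))) :=
  [[[(3, "red"), (5, "green")], [(2, "blue")]], [[(20, "red")]]]

def Spec_possible_id_sum (games : List (List (List (Int × String)))) (out : Int) : Prop := out = possible_id_sum_alt games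
instance (games : List (List (List (Int × String)))) (out : Int) : Decidable (Spec_possible_id_sum games out) := by unfold Spec_possible_id_sum; infer_instance

-- ===== CLAIM (what is proved, stated in full; the proofs are below) =====
def Claim_equal_possible_id_sum : Prop := ∀ (games : List (List (List (Int × String)))), Dom_possible_id_sum games → Pre_possible_id_sum games → Spec_possible_id_sum games (possible_id_sum games)

-- ===== LEMMAS AND PROOFS =====

def pvStep (m : PySem.Dict String Int) (p : Int × String) : PySem.Dict String Int :=
  m.insert p.2 (max (m.getD p.2 0) p.1)

def pvOk (m : PySem.Dict String Int) : Prop :=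
  m.getD "red" 0 ≤ 12 ∧ m.getD "green" 0 ≤ 13 ∧ m.getD "blue" 0 ≤ 14

lemma pvOk_step (m : PySem.Dict String Int) (p : Int × String)
    (hc : p.2 = "red" ∨ p.2 = "green" ∨ p.2 = "blue") :
    pvOk (pvStep m p) ↔ pvOk m ∧ p.1 ≤ pvLimits.getD p.2 0 := by
  obtain ⟨n, c⟩ := p
  rcases hc with h | h | h <;> subst h <;>
    simp [pvOk, pvStep, PySem.Dict.getD_insert, pvLimits] <;> tauto

lemma pvOk_foldl (l : List (Int × String)) (m : PySem.Dict String Int)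
    (hl : ∀ p ∈ l, p.2 = "red" ∨ p.2 = "green" ∨ p.2 = "blue") :
    pvOk (l.foldl pvStep m) ↔ pvOk m ∧ ∀ p ∈ l, p.1 ≤ pvLimits.getD p.2 0 := by
  induction l generalizing m with
  | nil => simp
  | cons p t ih =>
    simp only [List.foldl_cons, List.mem_cons, forall_eq_or_imp]
    rw [ih _ (fun q hq => hl q (List.mem_cons_of_mem p hq)),
        pvOk_step m p (hl p (List.mem_cons_self ..))]
    tauto

-- A's per-game condition is the negation of B's violation test.
lemma pvGame_cond (game : List (List (Int × String)))
    (hg : ∀ s ∈ game, ∀ p ∈ s, p.2 = "red" ∨ p.2 = "green" ∨ p.2 = "blue") :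
    (decide ((game.foldl (fun m subset =>
        subset.foldl (fun m p => m.insert p.2 (max (m.getD p.2 0) p.1)) m) pvInitMaxes).getD "red" 0 ≤ 12) &&
     decide ((game.foldl (fun m subset =>
        subset.foldl (fun m p => m.insert p.2 (max (m.getD p.2 0) p.1)) m) pvInitMaxes).getD "green" 0 ≤ 13) &&
     decide ((game.foldl (fun m subset =>
        subset.foldl (fun m p => m.insert p.2 (max (m.getD p.2 0) p.1)) m) pvInitMaxes).getD "blue" 0 ≤ 14))
    = !(game.any (fun subset => subset.any (fun q => decide (pvLimits.getD q.2 0 < q.1)))) := by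
  have hfold : game.foldl (fun m subset =>
      subset.foldl (fun m p => m.insert p.2 (max (m.getD p.2 0) p.1)) m) pvInitMaxes
      = game.flatten.foldl pvStep pvInitMaxes := by
    rw [List.foldl_flatten]; rfl
  have hflat : ∀ p ∈ game.flatten, p.2 = "red" ∨ p.2 = "green" ∨ p.2 = "blue" := by
    intro p hp
    obtain ⟨s, hs, hps⟩ := List.mem_flatten.mp hp
    exact hg s hs p hps
  have h := pvOk_foldl game.flatten pvInitMaxes hflat
  have hinit : pvOk pvInitMaxes := ⟨by decide, by decide, by decide⟩
  rw [hfold]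
  have hiff : pvOk (game.flatten.foldl pvStep pvInitMaxes) ↔
      ∀ p ∈ game.flatten, p.1 ≤ pvLimits.getD p.2 0 := by
    rw [h]; tauto
  simp only [pvOk] at hiff
  rw [Bool.eq_iff_iff]
  simp only [Bool.and_eq_true, decide_eq_true_eq, Bool.not_eq_true', List.any_eq_false,
    List.any_eq_true, not_exists, not_and, decide_eq_true_eq, not_lt, and_assoc]
  constructor
  · intro hok s hs p hps
    exact (hiff.mp (by tauto)) p (List.mem_flatten.mpr ⟨s, hs, hps⟩)
  · intro hall
    have h2 := hiff.mpr (fun p hp => by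
      obtain ⟨s, hs, hps⟩ := List.mem_flatten.mp hp; exact hall s hs p hps)
    tauto

-- Complementary-counting invariant: A's good-id sum plus B's bad-id sum is the sum of all ids.
lemma pvSplit (gs : List (List (List (Int × String)))) (k a b : Int)
    (hp : ∀ g ∈ gs, ∀ s ∈ g, ∀ p ∈ s, p.2 = "red" ∨ p.2 = "green" ∨ p.2 = "blue") :
    (gs.foldl (fun (st : Int × Int) game =>
      (if (decide ((game.foldl (fun m subset =>
             subset.foldl (fun m p => m.insert p.2 (max (m.getD p.2 0) p.1)) m) pvInitMaxes).getD "red" 0 ≤ 12) &&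
           decide ((game.foldl (fun m subset =>
             subset.foldl (fun m p => m.insert p.2 (max (m.getD p.2 0) p.1)) m) pvInitMaxes).getD "green" 0 ≤ 13) &&
           decide ((game.foldl (fun m subset =>
             subset.foldl (fun m p => m.insert p.2 (max (m.getD p.2 0) p.1)) m) pvInitMaxes).getD "blue" 0 ≤ 14))
       then st.1 + (st.2 + 1) else st.1, st.2 + 1)) (a, k)).1
    + (PySem.List.enumerate gs (k + 1)).foldl
      (fun acc p =>
        if p.2.any (fun subset => subset.any (fun q => decide (pvLimits.getD q.2 0 < q.1)))
        then acc + p.1 else acc) b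
    = a + b + ((PySem.List.enumerate gs (k + 1)).map (·.1)).sum := by
  induction gs generalizing k a b with
  | nil => simp [PySem.List.enumerate_nil]
  | cons g t ih =>
    rw [PySem.List.enumerate_cons]
    simp only [List.foldl_cons, List.map_cons, List.sum_cons]
    rw [pvGame_cond g (hp g (List.mem_cons_self ..))]
    have ht := fun g' hg' => hp g' (List.mem_cons_of_mem g hg')
    by_cases hb : (g.any (fun subset => subset.any (fun q => decide (pvLimits.getD q.2 0 < q.1)))) = true
    · simp only [hb, Bool.not_true, Bool.false_eq_true, if_false, if_true]
      have := ih (k + 1) a (b + (k + 1)) ht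
      rw [show k + 1 + 1 = k + 2 by ring] at this ⊢
      rw [this]; ring
    · simp only [Bool.not_eq_true] at hb
      simp only [hb, Bool.not_false, Bool.false_eq_true, if_false, if_true]
      have := ih (k + 1) (a + (k + 1)) b ht
      rw [show k + 1 + 1 = k + 2 by ring] at this ⊢
      rw [this]; ring

-- Gauss: twice the sum of ids 1..n is n*(n+1).
lemma pvGauss (n : Nat) : 2 * (PySem.List.pyRange 1 ((n : Int) + 1) 1).sum = (n : Int) * ((n : Int) + 1) := by
  induction n with
  | zero => decide
  | succ m ih =>
    rw [show ((m + 1 : Nat) : Int) + 1 = ((m : Int) + 1) + 1 by push_cast; ring,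
        PySem.List.pyRange_one_succ_right (by omega)]
    simp only [List.sum_append, List.sum_cons, List.sum_nil]
    push_cast
    rw [show ((m : Int) + 1) * ((m : Int) + 1 + 1) = (m : Int) * ((m : Int) + 1) + 2 * ((m : Int) + 1) by ring, ← ih]
    ring

-- ===== VERDICT (by name: the statement is the Claim_ definition above) =====
theorem possible_id_sum_spec : Claim_equal_possible_id_sum := by
  intro games _ hpre
  simp only [Spec_possible_id_sum, possible_id_sum, possible_id_sum_alt]
  have hp : ∀ g ∈ games, ∀ s ∈ g, ∀ p ∈ s, p.2 = "red" ∨ p.2 = "green" ∨ p.2 = "blue" := by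
    intro g hg s hs p hps
    unfold Pre_possible_id_sum at hpre
    simp only [List.all_eq_true, Bool.or_eq_true, beq_iff_eq] at hpre
    have := hpre g hg s hs p hps
    tauto
  have hsplit := pvSplit games 0 0 0 hp
  rw [zero_add] at hsplit
  rw [PySem.List.map_fst_enumerate] at hsplit
  have hfd : PySem.Int.floordiv ((games.length : Int) * ((games.length : Int) + 1)) 2
      = (PySem.List.pyRange 1 ((games.length : Int) + 1) 1).sum := by
    rw [PySem.Int.floordiv_eq_iff_of_pos (by norm_num)]
    have := pvGauss games.length
    constructor <;> omega
  rw [hfd]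
  have h1 : (1 : Int) + (games.length : Int) = (games.length : Int) + 1 := by ring
  rw [h1] at hsplit
  omega
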